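-- pv_equiv track=rewrite | github.com/zehrazadee/MizOil-Gas-Station | Lesson 14/App.py | count_numbers
-- ===== SOURCE A (Python) =====
-- def count_numbers(massiv):
--     sifir_say = 0
--     menfi_say = 0
--     musbet_say = 0
--     for eded in massiv:
--         if eded == 0:
--             sifir_say += 1
--         elif eded < 0:
--             menfi_say += 1
--         else:
--             musbet_say += 1
--     return sifir_say, menfi_say, musbet_say
-- ===== SOURCE B (Python) =====
-- def count_numbers(massiv):
--     items = list(massiv)
--     zeros = sum(1 for x in items if x == 0)
--     negs = sum(1 for x in items if x < 0)
--     return zeros, negs, len(items) - zeros - negs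
-- ===== Notes on version B (the rewrite author's own statement) =====
-- stated objective: simpler
-- what changed: Replaces the single loop with a three-way branching accumulator by two filtering counts (zeros, negatives) and derives positives arithmetically as len - zeros - negs.
import Mathlib
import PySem

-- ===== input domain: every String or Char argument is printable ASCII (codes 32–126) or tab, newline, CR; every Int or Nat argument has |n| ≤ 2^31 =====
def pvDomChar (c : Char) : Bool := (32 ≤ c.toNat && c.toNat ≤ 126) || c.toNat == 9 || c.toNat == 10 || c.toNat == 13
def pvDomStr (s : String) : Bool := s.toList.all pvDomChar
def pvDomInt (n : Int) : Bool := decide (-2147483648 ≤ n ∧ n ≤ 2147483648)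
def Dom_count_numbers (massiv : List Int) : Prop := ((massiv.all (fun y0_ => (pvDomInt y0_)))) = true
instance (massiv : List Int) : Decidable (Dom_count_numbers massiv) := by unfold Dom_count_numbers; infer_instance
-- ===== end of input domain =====

-- B counts zeros and negatives in two filtering passes and derives positives
-- arithmetically as len - zeros - negs; same O(n) cost, different decomposition.

-- ===== PORT A =====
-- A: one loop over massiv keeping three counters, branching per element.
def count_numbers (massiv : List Int) : Int × Int × Int :=
  massiv.foldl
    (fun (st : Int × Int × Int) (eded : Int) =>
      let (sifir_say, menfi_say, musbet_say) := st
      if eded == 0 then (sifir_say + 1, menfi_say, musbet_say)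
      else if eded < 0 then (sifir_say, menfi_say + 1, musbet_say)
      else (sifir_say, menfi_say, musbet_say + 1))
    (0, 0, 0)

-- ===== PORT B =====
-- B: sum(1 for x in items if x == 0) / sum(1 for x in items if x < 0), then len - zeros - negs.
def count_numbers_alt (massiv : List Int) : Int × Int × Int :=
  let items := massiv
  let zeros : Int := items.foldl (fun (acc : Int) (x : Int) => if x == 0 then acc + 1 else acc) 0
  let negs : Int := items.foldl (fun (acc : Int) (x : Int) => if x < 0 then acc + 1 else acc) 0
  (zeros, negs, (items.length : Int) - zeros - negs)

-- ===== PRECONDITION & SPEC =====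
def Spec_count_numbers (massiv : List Int) (out : Int × Int × Int) : Prop := out = count_numbers_alt massiv
instance (massiv : List Int) (out : Int × Int × Int) : Decidable (Spec_count_numbers massiv out) := by unfold Spec_count_numbers; infer_instance

-- ===== CLAIM (what is proved, stated in full; the proofs are below) =====
def Claim_equal_count_numbers : Prop := ∀ (massiv : List Int), Dom_count_numbers massiv → Spec_count_numbers massiv (count_numbers massiv)

-- ===== LEMMAS AND PROOFS =====

lemma cn_fold_eq_countP (l : List Int) (a b c : Int) :
    l.foldl
      (fun (st : Int × Int × Int) (eded : Int) =>
        let (sifir_say, menfi_say, musbet_say) := st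
        if eded == 0 then (sifir_say + 1, menfi_say, musbet_say)
        else if eded < 0 then (sifir_say, menfi_say + 1, musbet_say)
        else (sifir_say, menfi_say, musbet_say + 1))
      (a, b, c)
    = (a + (l.countP (fun x => x == 0) : Int),
       b + (l.countP (fun x => decide (x < 0)) : Int),
       c + (l.countP (fun x => !(x == 0) && !decide (x < 0)) : Int)) := by
  induction l generalizing a b c with
  | nil => simp
  | cons h t ih =>
    simp only [List.foldl_cons, List.countP_cons]
    by_cases h0 : h = 0
    · subst h0
      simp only [BEq.rfl, if_pos]
      rw [ih]
      simp only [Prod.mk.injEq]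
      norm_num
      push_cast [decide_true]
      ring
    · have hb : ((h : Int) == 0) = false := by simpa using h0
      by_cases hn : h < 0
      · simp only [hb, Bool.false_eq_true, if_false, hn, if_pos, ih]
        simp only [Prod.mk.injEq]
        refine ⟨by simp, ?_, ?_⟩
        · simp only [decide_true]
          push_cast; ring
        · simp [hn]
      · simp only [hb, Bool.false_eq_true, if_false, hn, ih]
        simp only [Prod.mk.injEq]
        refine ⟨by simp, by simp, ?_⟩
        simp only [hb, Bool.not_false, Bool.and_self, decide_false]
        push_cast; ring

lemma cn_partition (l : List Int) :
    l.countP (fun x => x == 0) + l.countP (fun x => decide (x < 0))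
      + l.countP (fun x => !(x == 0) && !decide (x < 0)) = l.length := by
  induction l with
  | nil => simp
  | cons h t ih =>
    simp only [List.countP_cons, List.length_cons]
    by_cases h0 : h = 0
    · subst h0; simp; omega
    · have hb : ((h : Int) == 0) = false := by simpa using h0
      by_cases hn : h < 0
      · simp [hb, hn]; omega
      · simp [hb, hn]; omega

theorem count_numbers_spec : Claim_equal_count_numbers := by
  intro massiv _
  unfold Spec_count_numbers count_numbers count_numbers_alt
  rw [cn_fold_eq_countP]
  simp only [PySem.List.foldl_if_add_one, PySem.List.foldl_ite_add_one]
  have hp := cn_partition massiv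
  simp only [Prod.mk.injEq]
  refine ⟨trivial, trivial, ?_⟩
  rw [← hp]
  push_cast
  ring
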